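-- pv_equiv track=rewrite | github.com/meng-ubc/TQSim | python/tqsim.py | remainingGates
-- ===== SOURCE A (Python) =====
-- def remainingGates(total_gates, min_gates, max_subcircs):
--     gates = []
--
--     while(total_gates > 0 and len(gates) < max_subcircs - 1):
--         gates.append(min(total_gates, min_gates))
--         total_gates -= min_gates
--
--     if total_gates > 0:
--         topup = (int)(total_gates / len(gates))
--
--         total_gates -= len(gates) * topup
--
--         for i in range(len(gates)):
--             gates[i] += topup
--
--         gates[0] += total_gates
--
--     return gates
-- ===== SOURCE B (Python) =====
-- def remainingGates(total_gates, min_gates, max_subcircs):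
--     # Closed-form: no loops; same float-truncating division as the original at the one
--     # place the original uses it.
--     if total_gates <= 0:
--         return []
--     n = max_subcircs - 1
--     if min_gates > 0 and total_gates <= n * min_gates:
--         # distribution exhausts total_gates: ceil(total/min) chunks, last one partial
--         k = -(-total_gates // min_gates)
--         return [min_gates] * (k - 1) + [total_gates - (k - 1) * min_gates]
--     # capped at n slots of min_gates; spread the leftover, remainder onto slot 0
--     left = total_gates - n * min_gates
--     t = int(left / n)
--     r = left - n * t
--     return [min_gates + t + r] + [min_gates + t] * (n - 1)
-- ===== Notes on version B (the rewrite author's own statement) =====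
-- stated objective: alternative
-- what changed: Replaces A's while-loop that appends gate counts one by one (plus a second top-up for-loop over the list) with a closed-form case split: ceil-division gives the exhausting distribution directly, and divmod-style arithmetic builds the capped distribution with list replication, using the same float-truncating int(left/n) division A uses at its single division site.
import Mathlib
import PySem

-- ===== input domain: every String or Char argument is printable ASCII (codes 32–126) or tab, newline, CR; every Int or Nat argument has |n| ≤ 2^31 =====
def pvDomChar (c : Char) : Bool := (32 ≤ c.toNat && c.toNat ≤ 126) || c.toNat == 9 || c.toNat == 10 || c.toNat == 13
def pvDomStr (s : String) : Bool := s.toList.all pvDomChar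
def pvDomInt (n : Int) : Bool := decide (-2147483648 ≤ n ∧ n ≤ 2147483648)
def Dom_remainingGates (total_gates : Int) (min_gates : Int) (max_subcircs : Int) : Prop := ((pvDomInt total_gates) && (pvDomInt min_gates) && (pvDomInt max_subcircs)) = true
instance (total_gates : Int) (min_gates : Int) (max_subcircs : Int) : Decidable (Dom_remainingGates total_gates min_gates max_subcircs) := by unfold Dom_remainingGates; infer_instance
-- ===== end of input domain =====

-- B replaces A's two loops by a closed-form case split (ceil division / replicated lists);
-- return values proved equal wherever A does not raise ZeroDivisionError.

-- Shared model of Python's `int(a / b)` on ints: CPython's int true division produces the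
-- correctly rounded (round-half-to-even) IEEE double of the exact rational a/b; `int` then
-- truncates toward zero. pyTrueDivTruncPos computes exactly that for a, b > 0; rounding is
-- sign-symmetric, so pyIntTrueDivTrunc extends it to all a and all b ≠ 0 (b = 0 is Python's
-- ZeroDivisionError; the 0 returned there is never relied on — such inputs are outside Pre_).
def pyTrueDivTruncPos (a b : Nat) : Nat :=
  -- e = floor(log2 (a/b))
  let d : Int := (Nat.log2 a : Int) - (Nat.log2 b : Int)
  let e : Int := if (if 0 ≤ d then b * 2 ^ d.toNat ≤ a else a * 2 ^ (-d).toNat ≥ b) then d else d - 1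
  -- scale so that the significand m sits in [2^52, 2^53]; round num/den half-to-even
  let num := if 0 ≤ 52 - e then a * 2 ^ (52 - e).toNat else a
  let den := if 0 ≤ 52 - e then b else b * 2 ^ (e - 52).toNat
  let m0 := num / den
  let r := num % den
  let m := if den < 2 * r then m0 + 1 else if 2 * r < den then m0 else if m0 % 2 = 0 then m0 else m0 + 1
  -- value of the double is m * 2^(e-52); truncation of a positive value is floor
  if 0 ≤ e - 52 then m * 2 ^ (e - 52).toNat else m / 2 ^ (52 - e).toNat

def pyIntTrueDivTrunc (a b : Int) : Int :=
  if a = 0 ∨ b = 0 then 0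
  else if (decide (0 < a)) == (decide (0 < b)) then (pyTrueDivTruncPos a.natAbs b.natAbs : Int)
  else -(pyTrueDivTruncPos a.natAbs b.natAbs : Int)

-- ===== PORT A =====
-- the while-loop: appends min(total_gates, min_gates) while total_gates > 0 and
-- len(gates) < max_subcircs - 1; fuel bounds the list length, which grows each step
def remainingGatesLoop (min_gates max_subcircs : Int) :
    Nat → Int → List Int → Int × List Int
  | 0, total, gates => (total, gates)
  | fuel + 1, total, gates =>
    if 0 < total ∧ (gates.length : Int) < max_subcircs - 1 then
      remainingGatesLoop min_gates max_subcircs fuel (total - min_gates)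
        (gates ++ [min total min_gates])
    else (total, gates)

def remainingGates (total_gates : Int) (min_gates : Int) (max_subcircs : Int) : List Int :=
  let p := remainingGatesLoop min_gates max_subcircs (max_subcircs - 1).toNat total_gates []
  let total := p.1
  let gates := p.2
  if 0 < total then
    -- topup = int(total_gates / len(gates)); Python raises ZeroDivisionError when
    -- gates = [] — excluded by Pre_
    let topup := pyIntTrueDivTrunc total (gates.length : Int)
    let total2 := total - (gates.length : Int) * topup
    let gates2 := gates.map (· + topup)   -- for i in range(len(gates)): gates[i] += topup
    match gates2 with
    | [] => []                            -- unreachable under Pre_ (ZeroDivisionError above)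
    | g :: gs => (g + total2) :: gs       -- gates[0] += total_gates
  else gates

-- ===== PORT B =====
def remainingGates_alt (total_gates : Int) (min_gates : Int) (max_subcircs : Int) : List Int :=
  if total_gates ≤ 0 then []
  else
    let n := max_subcircs - 1
    if 0 < min_gates ∧ total_gates ≤ n * min_gates then
      let k := -(PySem.Int.floordiv (-total_gates) min_gates)
      List.replicate (k - 1).toNat min_gates ++ [total_gates - (k - 1) * min_gates]
    else
      let left := total_gates - n * min_gates
      let t := pyIntTrueDivTrunc left n
      let r := left - n * t
      (min_gates + t + r) :: List.replicate (n - 1).toNat (min_gates + t)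

-- ===== PRECONDITION & SPEC =====
-- Pre_ excludes exactly the inputs where A raises ZeroDivisionError: total_gates > 0
-- with max_subcircs ≤ 1 (the gates list stays empty and A divides by len(gates) = 0).
def Pre_remainingGates (total_gates : Int) (min_gates : Int) (max_subcircs : Int) : Prop :=
  total_gates ≤ 0 ∨ 2 ≤ max_subcircs
instance (total_gates : Int) (min_gates : Int) (max_subcircs : Int) : Decidable (Pre_remainingGates total_gates min_gates max_subcircs) := by unfold Pre_remainingGates; infer_instance

def pvWitness_remainingGates : Int × Int × Int := (17, 5, 4)

def Spec_remainingGates (total_gates : Int) (min_gates : Int) (max_subcircs : Int) (out : List Int) : Prop := out = remainingGates_alt total_gates min_gates max_subcircs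
instance (total_gates : Int) (min_gates : Int) (max_subcircs : Int) (out : List Int) : Decidable (Spec_remainingGates total_gates min_gates max_subcircs out) := by unfold Spec_remainingGates; infer_instance

-- ===== CLAIM (what is proved, stated in full; the proofs are below) =====
def Claim_equal_remainingGates : Prop := ∀ (total_gates : Int) (min_gates : Int) (max_subcircs : Int), Dom_remainingGates total_gates min_gates max_subcircs → Pre_remainingGates total_gates min_gates max_subcircs → Spec_remainingGates total_gates min_gates max_subcircs (remainingGates total_gates min_gates max_subcircs)

-- ===== LEMMAS AND PROOFS =====

-- exhausting case: min_gates > 0 and total fits below the cap; the loop emits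
-- k-1 full chunks of min_gates and one final partial chunk, ending with total ≤ 0
theorem loop_exhausts (m s : Int) (hm : 0 < m) :
    ∀ (fuel : Nat) (total k : Int) (gates : List Int),
      0 < total → (k - 1) * m < total → total ≤ k * m →
      k ≤ (fuel : Int) → (k : Int) ≤ s - 1 - gates.length →
      remainingGatesLoop m s fuel total gates =
        (total - k * m, gates ++ List.replicate (k - 1).toNat m ++ [total - (k - 1) * m]) := by
  intro fuel
  induction fuel with
  | zero => intro total k gates ht hk1 hk2 hf hs
            exfalso
            have : 1 ≤ k := by nlinarith
            omega
  | succ f ih =>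
    intro total k gates ht hk1 hk2 hf hs
    have hk : 1 ≤ k := by nlinarith
    rw [remainingGatesLoop]
    have hcond : 0 < total ∧ (gates.length : Int) < s - 1 := by
      constructor
      · exact ht
      · have : (0:Int) < k := by omega
        omega
    rw [if_pos hcond]
    by_cases hle : total ≤ m
    · -- last iteration: k = 1, appends total, new total ≤ 0
      have hk1' : k = 1 := by nlinarith
      subst hk1'
      have hmin : min total m = total := min_eq_left hle
      rw [hmin]
      have : remainingGatesLoop m s f (total - m) (gates ++ [total]) = (total - m, gates ++ [total]) := by
        cases f with
        | zero => rfl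
        | succ f' => rw [remainingGatesLoop, if_neg]; intro ⟨h1, _⟩; omega
      rw [this]
      simp
    · -- full chunk of m; recurse with k - 1
      have hmin : min total m = m := min_eq_right (by omega)
      rw [hmin]
      have := ih (total - m) (k - 1) (gates ++ [m])
        (by omega) (by nlinarith) (by nlinarith) (by omega)
        (by simp; omega)
      rw [this]
      have hk2' : 2 ≤ k := by nlinarith
      have hr : (k - 1).toNat = ((k - 1 - 1).toNat) + 1 := by omega
      rw [hr, List.replicate_succ]
      have e1 : total - m - (k - 1) * m = total - k * m := by ring
      have e2 : total - m - (k - 1 - 1) * m = total - (k - 1) * m := by ring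
      rw [e1, e2]
      simp

-- capped case: the leftover stays positive through all s-1-len iterations, each of
-- which appends exactly min_gates
theorem loop_capped (m s : Int) :
    ∀ (fuel : Nat) (total : Int) (gates : List Int),
      0 < total → (s - 1 - gates.length) * m < total →
      0 ≤ s - 1 - (gates.length : Int) → s - 1 - (gates.length : Int) ≤ (fuel : Int) →
      remainingGatesLoop m s fuel total gates =
        (total - (s - 1 - gates.length) * m,
         gates ++ List.replicate (s - 1 - (gates.length : Int)).toNat m) := by
  intro fuel
  induction fuel with
  | zero =>
    intro total gates ht hlt h0 hf
    have : s - 1 - (gates.length : Int) = 0 := by omega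
    rw [remainingGatesLoop]
    simp [this]
  | succ f ih =>
    intro total gates ht hlt h0 hf
    by_cases hrun : (gates.length : Int) < s - 1
    · rw [remainingGatesLoop, if_pos ⟨ht, hrun⟩]
      have hr1 : 1 ≤ s - 1 - (gates.length : Int) := by omega
      have hmlt : m < total := by nlinarith
      have hmin : min total m = m := min_eq_right (by omega)
      rw [hmin]
      have := ih (total - m) (gates ++ [m])
        (by omega)
        (by have hlen : ((gates ++ [m]).length : Int) = gates.length + 1 := by simp
            rw [hlen]; nlinarith)
        (by simp; omega) (by simp; omega)
      rw [this]
      have hlen : ((gates ++ [m]).length : Int) = gates.length + 1 := by simp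
      rw [hlen]
      have hrn : (s - 1 - (gates.length : Int)).toNat = (s - 1 - ((gates.length : Int) + 1)).toNat + 1 := by omega
      rw [hrn, List.replicate_succ]
      simp only [Prod.mk.injEq]
      exact ⟨by ring, by simp⟩
    · have : s - 1 - (gates.length : Int) = 0 := by omega
      rw [remainingGatesLoop, if_neg (by intro ⟨_, h⟩; omega)]
      simp [this]

-- ===== VERDICT (by name: the statement is the Claim_ definition above) =====
theorem remainingGates_spec : Claim_equal_remainingGates := by
  intro t m s _ hpre
  unfold Spec_remainingGates remainingGates remainingGates_alt
  by_cases ht : t ≤ 0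
  · -- loop never runs, total stays ≤ 0
    have hloop : ∀ fuel, remainingGatesLoop m s fuel t [] = (t, []) := by
      intro fuel
      cases fuel with
      | zero => rfl
      | succ f => rw [remainingGatesLoop, if_neg]; intro ⟨h1, _⟩; omega
    simp [hloop, ht]
  · have ht' : 0 < t := by omega
    have hs : 2 ≤ s := by rcases hpre with h | h; omega; exact h
    rw [if_neg ht]
    by_cases hcase : 0 < m ∧ t ≤ (s - 1) * m
    · -- exhausting case: the loop ends with total ≤ 0, the top-up branch is skipped
      rw [if_pos hcase]
      obtain ⟨hm, hcap⟩ := hcase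
      have hkb : (-(PySem.Int.floordiv (-t) m) - 1) * m < t ∧ t ≤ -(PySem.Int.floordiv (-t) m) * m :=
        (PySem.Int.neg_floordiv_neg_eq_iff_of_pos hm).mp rfl
      set k := -(PySem.Int.floordiv (-t) m) with hkdef
      have hks : k ≤ s - 1 := by nlinarith [hkb.1, hkb.2]
      have hloop := loop_exhausts m s hm (s - 1).toNat t k []
        ht' hkb.1 hkb.2 (by omega) (by simp; omega)
      simp only [List.nil_append] at hloop
      simp only [hloop]
      rw [if_neg (show ¬ (0:Int) < t - k * m by omega)]
    · -- capped case: the loop fills s-1 slots of min_gates, the top-up branch fires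
      rw [if_neg hcase]
      have hlt : (s - 1) * m < t := by
        by_cases hm : 0 < m
        · rcases not_and_or.mp hcase with h | h
          · omega
          · omega
        · nlinarith
      have hloop := loop_capped m s (s - 1).toNat t []
        ht' (by simpa using hlt) (by simp; omega) (by simp; omega)
      simp only [List.length_nil, Nat.cast_zero, Int.sub_zero, List.nil_append] at hloop
      simp only [hloop]
      rw [if_pos (show (0:Int) < t - (s - 1) * m by omega)]
      have hlen : (((List.replicate (s - 1).toNat m).length : Nat) : Int) = s - 1 := by
        simp; omega
      simp only [hlen, List.map_replicate]
      have hsplit : (s - 1).toNat = (s - 2).toNat + 1 := by omega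
      rw [hsplit, List.replicate_succ]
      have e2 : (s - 2).toNat = (s - 1 - 1).toNat := by omega
      rw [e2]
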